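-- pv_equiv track=rewrite | github.com/lepetitprinz/coding-challenge-auto-push | 백준/Silver/11057. 오르막 수/오르막 수.py | solve
-- ===== SOURCE A (Python) =====
-- def solve(n):
--     arr = [[1] * 10]
--
--     for step in range(1, n):
--         prev_row = arr[step - 1]
--         temp = []
--         for i in range(0 , 10):
--             val = sum(prev_row[i:]) % 10007
--             temp.append(val)
--         arr.append(temp)
--
--     return sum(arr[-1]) % 10007
-- ===== SOURCE B (Python) =====
-- def solve(n):
--     row = [1] * 10
--     for _ in range(1, n):
--         acc = 0
--         temp = []
--         for x in reversed(row):
--             acc = (acc + x) % 10007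
--             temp = [acc] + temp
--         row = temp
--     return sum(row) % 10007
-- ===== Notes on version B (the rewrite author's own statement) =====
-- stated objective: simpler
-- what changed: B keeps only one DP row and fills each new row in a single backward pass with a running suffix accumulator (reduced by the modulus at each step), instead of A's re-summing a slice prev_row[i:] for every column while storing all rows.
import Mathlib
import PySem

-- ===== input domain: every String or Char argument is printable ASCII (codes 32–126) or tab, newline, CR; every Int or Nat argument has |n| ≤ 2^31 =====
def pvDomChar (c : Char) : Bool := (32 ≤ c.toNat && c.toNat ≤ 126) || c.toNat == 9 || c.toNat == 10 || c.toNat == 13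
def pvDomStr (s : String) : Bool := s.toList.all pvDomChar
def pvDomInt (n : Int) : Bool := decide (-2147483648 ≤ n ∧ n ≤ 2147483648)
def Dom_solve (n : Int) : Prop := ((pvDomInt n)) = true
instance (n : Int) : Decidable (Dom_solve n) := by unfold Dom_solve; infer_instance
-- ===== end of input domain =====

-- B keeps only one DP row and fills each new row in one backward pass with a running
-- suffix accumulator, instead of A's per-column slice re-summing over all stored rows (simpler).

-- ===== PORT A =====
-- inner loop of A: temp = [sum(prev_row[i:]) % 10007 for i in range(0,10)] (built by append)
def solveRowA (prev_row : List Int) : List Int :=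
  (PySem.List.pyRange 0 10 1).foldl
    (fun temp i => temp ++ [PySem.Int.mod (PySem.List.slice prev_row (some i) none).sum 10007]) []

-- arr[step-1] and arr[-1] are always in range (arr starts nonempty and only grows),
-- so pyGetD's default [] is never used; the Python A never raises.
def solve (n : Int) : Int :=
  let arr := (PySem.List.pyRange 1 n 1).foldl
    (fun arr step => arr ++ [solveRowA (PySem.List.pyGetD arr (step - 1) [])])
    [List.replicate 10 (1 : Int)]
  PySem.Int.mod (PySem.List.pyGetD arr (-1) []).sum 10007

-- ===== PORT B =====
-- inner loop of B: for x in reversed(row): acc = (acc + x) % 10007; temp = [acc] + temp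
def stepB (row : List Int) : List Int :=
  (row.reverse.foldl
    (fun (st : Int × List Int) x =>
      let acc := PySem.Int.mod (st.1 + x) 10007
      (acc, acc :: st.2))
    (0, [])).2

def solve_alt (n : Int) : Int :=
  let row := (PySem.List.pyRange 1 n 1).foldl (fun row _ => stepB row) (List.replicate 10 (1 : Int))
  PySem.Int.mod row.sum 10007

-- ===== PRECONDITION & SPEC =====
def Spec_solve (n : Int) (out : Int) : Prop := out = solve_alt n
instance (n : Int) (out : Int) : Decidable (Spec_solve n out) := by unfold Spec_solve; infer_instance

-- ===== CLAIM (what is proved, stated in full; the proofs are below) =====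
def Claim_equal_solve : Prop := ∀ (n : Int), Dom_solve n → Spec_solve n (solve n)

-- ===== LEMMAS AND PROOFS =====

-- spec of B's inner accumulator loop: the successive values of acc
def accList (s : Int) : List Int → List Int
  | [] => []
  | x :: xs => PySem.Int.mod (s + x) 10007 :: accList (PySem.Int.mod (s + x) 10007) xs

def lastAcc (s : Int) : List Int → Int
  | [] => s
  | x :: xs => lastAcc (PySem.Int.mod (s + x) 10007) xs

lemma foldB_eq (xs : List Int) : ∀ (s : Int) (t : List Int),
    xs.foldl
      (fun (st : Int × List Int) x =>
        let acc := PySem.Int.mod (st.1 + x) 10007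
        (acc, acc :: st.2))
      (s, t)
    = (lastAcc s xs, (accList s xs).reverse ++ t) := by
  induction xs with
  | nil => intro s t; simp [lastAcc, accList]
  | cons x xs ih =>
    intro s t
    refine ((ih (PySem.Int.mod (s + x) 10007) (PySem.Int.mod (s + x) 10007 :: t)).trans ?_)
    simp [accList, lastAcc]

lemma stepB_eq (row : List Int) : stepB row = (accList 0 row.reverse).reverse := by
  unfold stepB
  rw [foldB_eq]
  simp

lemma length_accList (s : Int) (xs : List Int) : (accList s xs).length = xs.length := by
  induction xs generalizing s with
  | nil => simp [accList]
  | cons x xs ih => simp [accList, ih]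

lemma length_stepB (row : List Int) : (stepB row).length = row.length := by
  simp [stepB_eq, length_accList]

lemma rowA10 (a b c d e f g h i j : Int) :
    solveRowA [a, b, c, d, e, f, g, h, i, j] = stepB [a, b, c, d, e, f, g, h, i, j] := by
  have h1 : PySem.List.pyRange 0 10 1 = [0,1,2,3,4,5,6,7,8,9] := by decide
  have hrev : ([a, b, c, d, e, f, g, h, i, j] : List Int).reverse
      = [j, i, h, g, f, e, d, c, b, a] := by simp
  rw [stepB_eq, hrev]
  simp only [solveRowA, h1, List.foldl, List.nil_append, List.cons_append]
  norm_num [PySem.List.slice_from, accList]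
  and_intros <;> (try simp) <;> omega

lemma rowA_eq_stepB (row : List Int) (hlen : row.length = 10) :
    solveRowA row = stepB row := by
  rcases row with _|⟨a,_|⟨b,_|⟨c,_|⟨d,_|⟨e,_|⟨f,_|⟨g,_|⟨h,_|⟨i,_|⟨j,_|⟨k,row⟩⟩⟩⟩⟩⟩⟩⟩⟩⟩⟩ <;>
    simp only [List.length_cons, List.length_nil] at hlen <;>
    first
      | omega
      | exact rowA10 a b c d e f g h i j

-- the loop invariant: A's arr has length m.toNat and its last row is B's row, of length 10
lemma loop_inv : ∀ (m : Int), 1 ≤ m →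
    ∃ pre : List (List Int),
      ((PySem.List.pyRange 1 m 1).foldl
        (fun arr step => arr ++ [solveRowA (PySem.List.pyGetD arr (step - 1) [])])
        [List.replicate 10 (1 : Int)])
        = pre ++ [(PySem.List.pyRange 1 m 1).foldl (fun row _ => stepB row)
                    (List.replicate 10 (1 : Int))]
      ∧ pre.length + 1 = m.toNat
      ∧ ((PySem.List.pyRange 1 m 1).foldl (fun row _ => stepB row)
          (List.replicate 10 (1 : Int))).length = 10 := by
  intro m hm
  induction m, hm using Int.le_induction with
  | base =>
    refine ⟨[], ?_, ?_, ?_⟩ <;>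
      simp [PySem.List.pyRange_one_eq_nil (by omega : (1:Int) ≤ 1)]
  | succ m hm ih =>
    obtain ⟨pre, hfold, hlen, hrow⟩ := ih
    rw [PySem.List.pyRange_one_succ_right (by omega : (1:Int) ≤ m), List.foldl_append,
      List.foldl_append, hfold]
    set rB := (PySem.List.pyRange 1 m 1).foldl (fun row _ => stepB row)
      (List.replicate 10 (1 : Int)) with hrB
    refine ⟨pre ++ [rB], ?_, ?_, ?_⟩
    · simp only [List.foldl]
      have hget : PySem.List.pyGetD (pre ++ [rB]) (m - 1) ([] : List Int) = rB := by
        have h0 : (0:Int) ≤ m - 1 := by omega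
        have h1 : m - 1 < ((pre ++ [rB]).length : Int) := by
          simp only [List.length_append, List.length_cons, List.length_nil]
          omega
        rw [PySem.List.pyGetD_eq_getElem _ _ h0 h1]
        have h2 : (m - 1).toNat = pre.length := by
          simp only [List.length_append, List.length_cons, List.length_nil] at h1
          omega
        simp [h2]
      rw [hget, rowA_eq_stepB rB hrow]
    · simp only [List.length_append, List.length_cons, List.length_nil]
      omega
    · simpa [length_stepB] using hrow

-- ===== VERDICT (by name: the statement is the Claim_ definition above) =====
theorem solve_spec : Claim_equal_solve := by
  unfold Claim_equal_solve Spec_solve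
  intro n _
  by_cases hn : 1 ≤ n
  · obtain ⟨pre, hfold, _, _⟩ := loop_inv n hn
    simp only [solve, solve_alt, hfold, PySem.List.pyGetD_neg_one_append_singleton]
  · simp [solve, solve_alt, PySem.List.pyRange_one_eq_nil (by omega : n ≤ 1)]
    decide
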